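-- pv_equiv track=rewrite | github.com/okanyucel2/genesis-bigr-discovery | bigr/threat/feeds/alienvault.py | _classify_pulse
-- ===== SOURCE A (Python) =====
-- def _classify_pulse(tags: list[str]) -> str:
--     """Classify indicator type based on pulse tags."""
--     tag_set = {t.lower() for t in tags}
--
--     if tag_set & {"c2", "c&c", "command and control", "rat"}:
--         return "malware_c2"
--     if tag_set & {"botnet", "ddos"}:
--         return "botnet"
--     if tag_set & {"scanner", "scanning", "brute force", "bruteforce"}:
--         return "scanner"
--     if tag_set & {"spam", "phishing"}:
--         return "spam"
--     if tag_set & {"ransomware", "malware", "trojan"}: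
--         return "malware_c2"
--     if tag_set & {"apt", "targeted attack"}:
--         return "apt"
--
--     return "malicious"
-- ===== SOURCE B (Python) =====
-- _RANK = {
--     "c2": (0, "malware_c2"), "c&c": (0, "malware_c2"),
--     "command and control": (0, "malware_c2"), "rat": (0, "malware_c2"),
--     "botnet": (1, "botnet"), "ddos": (1, "botnet"),
--     "scanner": (2, "scanner"), "scanning": (2, "scanner"),
--     "brute force": (2, "scanner"), "bruteforce": (2, "scanner"),
--     "spam": (3, "spam"), "phishing": (3, "spam"),
--     "ransomware": (4, "malware_c2"), "malware": (4, "malware_c2"),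
--     "trojan": (4, "malware_c2"),
--     "apt": (5, "apt"), "targeted attack": (5, "apt"),
-- }
--
--
-- def _classify_pulse(tags: list[str]) -> str:
--     """Classify indicator type based on pulse tags."""
--     best = None
--     for t in tags:
--         e = _RANK.get(t.lower())
--         if e is not None and (best is None or e[0] < best[0]):
--             best = e
--     return best[1] if best is not None else "malicious"
-- ===== Notes on version B (the rewrite author's own statement) =====
-- stated objective: alternative
-- what changed: Replaced the six ordered set-intersection branches with a keyword-to-(priority,label) dict built once and a single pass over the tags keeping the best-ranked match, returning its label or 'malicious'.
import Mathlib
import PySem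

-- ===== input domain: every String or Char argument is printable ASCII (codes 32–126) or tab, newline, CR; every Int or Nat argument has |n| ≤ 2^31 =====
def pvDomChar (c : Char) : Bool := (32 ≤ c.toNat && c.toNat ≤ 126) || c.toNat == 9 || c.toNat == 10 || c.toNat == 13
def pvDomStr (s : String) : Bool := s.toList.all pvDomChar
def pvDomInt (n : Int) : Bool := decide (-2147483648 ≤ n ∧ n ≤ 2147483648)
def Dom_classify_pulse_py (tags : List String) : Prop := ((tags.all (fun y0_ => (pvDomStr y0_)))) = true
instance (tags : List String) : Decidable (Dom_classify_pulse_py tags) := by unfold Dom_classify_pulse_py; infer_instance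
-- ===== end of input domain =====

-- B replaces the six ordered set-intersection branches by a keyword->(priority,label) dict and one
-- best-match pass over the tags (objective: alternative decomposition, same cost).

-- ===== PORT A =====
def classify_pulse_py (tags : List String) : String :=
  let tag_set : PySem.Set String := PySem.Set.ofList (tags.map PySem.Str.lower)
  if PySem.Set.inter tag_set (PySem.Set.ofList ["c2", "c&c", "command and control", "rat"]) ≠ [] then
    "malware_c2"
  else if PySem.Set.inter tag_set (PySem.Set.ofList ["botnet", "ddos"]) ≠ [] then
    "botnet"
  else if PySem.Set.inter tag_set (PySem.Set.ofList ["scanner", "scanning", "brute force", "bruteforce"]) ≠ [] then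
    "scanner"
  else if PySem.Set.inter tag_set (PySem.Set.ofList ["spam", "phishing"]) ≠ [] then
    "spam"
  else if PySem.Set.inter tag_set (PySem.Set.ofList ["ransomware", "malware", "trojan"]) ≠ [] then
    "malware_c2"
  else if PySem.Set.inter tag_set (PySem.Set.ofList ["apt", "targeted attack"]) ≠ [] then
    "apt"
  else
    "malicious"

-- ===== PORT B =====
def pvRank : PySem.Dict String (Int × String) := PySem.Dict.ofList
  [("c2", ((0:Int), "malware_c2")), ("c&c", (0, "malware_c2")),
   ("command and control", (0, "malware_c2")), ("rat", (0, "malware_c2")),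
   ("botnet", ((1:Int), "botnet")), ("ddos", (1, "botnet")),
   ("scanner", ((2:Int), "scanner")), ("scanning", (2, "scanner")),
   ("brute force", (2, "scanner")), ("bruteforce", (2, "scanner")),
   ("spam", ((3:Int), "spam")), ("phishing", (3, "spam")),
   ("ransomware", ((4:Int), "malware_c2")), ("malware", (4, "malware_c2")),
   ("trojan", (4, "malware_c2")),
   ("apt", ((5:Int), "apt")), ("targeted attack", (5, "apt"))]

def classify_pulse_py_alt (tags : List String) : String :=
  let best : Option (Int × String) :=
    tags.foldl (fun best t =>
      match PySem.Dict.get? pvRank (PySem.Str.lower t) with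
      | none => best
      | some e =>
        match best with
        | none => some e
        | some b => if e.1 < b.1 then some e else best) none
  match best with
  | some b => b.2
  | none => "malicious"

-- ===== PRECONDITION & SPEC =====
def Spec_classify_pulse_py (tags : List String) (out : String) : Prop := out = classify_pulse_py_alt tags
instance (tags : List String) (out : String) : Decidable (Spec_classify_pulse_py tags out) := by unfold Spec_classify_pulse_py; infer_instance

-- ===== CLAIM (what is proved, stated in full; the proofs are below) =====
def Claim_equal_classify_pulse_py : Prop := ∀ (tags : List String), Dom_classify_pulse_py tags → Spec_classify_pulse_py tags (classify_pulse_py tags)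

-- ===== LEMMAS AND PROOFS =====

-- proof-only helpers
lemma pvRank_mk : pvRank = PySem.Dict.mk
  [("c2", ((0:Int), "malware_c2")),
   ("c&c", ((0:Int), "malware_c2")),
   ("command and control", ((0:Int), "malware_c2")),
   ("rat", ((0:Int), "malware_c2")),
   ("botnet", ((1:Int), "botnet")),
   ("ddos", ((1:Int), "botnet")),
   ("scanner", ((2:Int), "scanner")),
   ("scanning", ((2:Int), "scanner")),
   ("brute force", ((2:Int), "scanner")),
   ("bruteforce", ((2:Int), "scanner")),
   ("spam", ((3:Int), "spam")),
   ("phishing", ((3:Int), "spam")),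
   ("ransomware", ((4:Int), "malware_c2")),
   ("malware", ((4:Int), "malware_c2")),
   ("trojan", ((4:Int), "malware_c2")),
   ("apt", ((5:Int), "apt")),
   ("targeted attack", ((5:Int), "apt"))] := by decide

def pvKeys : List String := ["c2","c&c","command and control","rat","botnet","ddos","scanner","scanning","brute force","bruteforce","spam","phishing","ransomware","malware","trojan","apt","targeted attack"]

lemma pvg1 : pvRank.get? "c2" = some (0, "malware_c2") := by decide
lemma pvg2 : pvRank.get? "c&c" = some (0, "malware_c2") := by decide
lemma pvg3 : pvRank.get? "command and control" = some (0, "malware_c2") := by decide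
lemma pvg4 : pvRank.get? "rat" = some (0, "malware_c2") := by decide
lemma pvg5 : pvRank.get? "botnet" = some (1, "botnet") := by decide
lemma pvg6 : pvRank.get? "ddos" = some (1, "botnet") := by decide
lemma pvg7 : pvRank.get? "scanner" = some (2, "scanner") := by decide
lemma pvg8 : pvRank.get? "scanning" = some (2, "scanner") := by decide
lemma pvg9 : pvRank.get? "brute force" = some (2, "scanner") := by decide
lemma pvg10 : pvRank.get? "bruteforce" = some (2, "scanner") := by decide
lemma pvg11 : pvRank.get? "spam" = some (3, "spam") := by decide
lemma pvg12 : pvRank.get? "phishing" = some (3, "spam") := by decide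
lemma pvg13 : pvRank.get? "ransomware" = some (4, "malware_c2") := by decide
lemma pvg14 : pvRank.get? "malware" = some (4, "malware_c2") := by decide
lemma pvg15 : pvRank.get? "trojan" = some (4, "malware_c2") := by decide
lemma pvg16 : pvRank.get? "apt" = some (5, "apt") := by decide
lemma pvg17 : pvRank.get? "targeted attack" = some (5, "apt") := by decide

lemma pvRank_none (x : String) (h : x ∉ pvKeys) : pvRank.get? x = none := by
  simp only [pvKeys, List.mem_cons, List.not_mem_nil, or_false, not_or] at h
  obtain ⟨h1,h2,h3,h4,h5,h6,h7,h8,h9,h10,h11,h12,h13,h14,h15,h16,h17⟩ := h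
  simp [pvRank_mk, PySem.Dict.get?_mk_cons, PySem.Dict.get?, beq_iff_eq,
    Ne.symm h1, Ne.symm h2, Ne.symm h3, Ne.symm h4, Ne.symm h5, Ne.symm h6, Ne.symm h7, Ne.symm h8, Ne.symm h9, Ne.symm h10, Ne.symm h11, Ne.symm h12, Ne.symm h13, Ne.symm h14, Ne.symm h15, Ne.symm h16, Ne.symm h17]

def pvMerge : Option (Int × String) → Option (Int × String) → Option (Int × String)
  | none, b => b
  | some a, none => some a
  | some a, some b => if b.1 < a.1 then some b else some a

lemma pvMerge_none_right (a : Option (Int × String)) : pvMerge a none = a := by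
  cases a <;> rfl

def pvBestOf : List String → Option (Int × String)
  | [] => none
  | t :: ts => pvMerge (pvRank.get? (PySem.Str.lower t)) (pvBestOf ts)

def pvOut : Option (Int × String) → String
  | some b => b.2
  | none => "malicious"

def pvSpecMin (l : List String) : Option (Int × String) :=
  if ∃ t ∈ l, PySem.Str.lower t ∈ ["c2", "c&c", "command and control", "rat"] then some (0, "malware_c2")
  else if ∃ t ∈ l, PySem.Str.lower t ∈ ["botnet", "ddos"] then some (1, "botnet")
  else if ∃ t ∈ l, PySem.Str.lower t ∈ ["scanner", "scanning", "brute force", "bruteforce"] then some (2, "scanner")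
  else if ∃ t ∈ l, PySem.Str.lower t ∈ ["spam", "phishing"] then some (3, "spam")
  else if ∃ t ∈ l, PySem.Str.lower t ∈ ["ransomware", "malware", "trojan"] then some (4, "malware_c2")
  else if ∃ t ∈ l, PySem.Str.lower t ∈ ["apt", "targeted attack"] then some (5, "apt")
  else none

lemma pv_inter_ne (tags : List String) (G : List String) :
    (PySem.Set.inter (PySem.Set.ofList (tags.map PySem.Str.lower)) (PySem.Set.ofList G) ≠ []) ↔
      (∃ t ∈ tags, PySem.Str.lower t ∈ G) := by
  rw [Ne, List.eq_nil_iff_forall_not_mem]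
  push_neg
  constructor
  · rintro ⟨x, hx⟩
    rw [PySem.Set.mem_inter, PySem.Set.mem_ofList, PySem.Set.mem_ofList, List.mem_map] at hx
    obtain ⟨⟨t, ht, rfl⟩, hg⟩ := hx
    exact ⟨t, ht, hg⟩
  · rintro ⟨t, ht, hg⟩
    refine ⟨PySem.Str.lower t, ?_⟩
    rw [PySem.Set.mem_inter, PySem.Set.mem_ofList, PySem.Set.mem_ofList, List.mem_map]
    exact ⟨⟨t, ht, rfl⟩, hg⟩

lemma pvA_eq (tags : List String) : classify_pulse_py tags = pvOut (pvSpecMin tags) := by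
  unfold classify_pulse_py pvSpecMin
  simp only [pv_inter_ne]
  split_ifs <;> rfl

lemma pv_step (best : Option (Int × String)) (t : String) :
    (match pvRank.get? (PySem.Str.lower t) with
      | none => best
      | some e =>
        match best with
        | none => some e
        | some b => if e.1 < b.1 then some e else best) = pvMerge best (pvRank.get? (PySem.Str.lower t)) := by
  cases pvRank.get? (PySem.Str.lower t) <;> cases best <;> rfl

lemma pvMerge_assoc (a b c : Option (Int × String)) :
    pvMerge (pvMerge a b) c = pvMerge a (pvMerge b c) := by
  cases a with
  | none => rfl
  | some a =>
    cases b with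
    | none => rfl
    | some b =>
      cases c with
      | none => simp only [pvMerge]; split_ifs <;> rfl
      | some c =>
        simp only [pvMerge]
        by_cases h1 : b.1 < a.1 <;> by_cases h2 : c.1 < b.1 <;> by_cases h3 : c.1 < a.1 <;>
          simp [h1, h2, h3] <;> omega

lemma pv_fold (l : List String) (best : Option (Int × String)) :
    (l.foldl (fun best t =>
      match pvRank.get? (PySem.Str.lower t) with
      | none => best
      | some e =>
        match best with
        | none => some e
        | some b => if e.1 < b.1 then some e else best) best) = pvMerge best (pvBestOf l) := by
  induction l generalizing best with
  | nil => simp [pvBestOf, pvMerge_none_right]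
  | cons t ts ih =>
    simp only [List.foldl_cons, pvBestOf]
    rw [ih, pv_step, pvMerge_assoc]

lemma pvB_eq (tags : List String) : classify_pulse_py_alt tags = pvOut (pvBestOf tags) := by
  unfold classify_pulse_py_alt
  rw [pv_fold]
  rfl

lemma pvBestOf_eq_specMin (l : List String) : pvBestOf l = pvSpecMin l := by
  induction l with
  | nil => simp [pvBestOf, pvSpecMin]
  | cons t ts ih =>
    rw [pvBestOf, ih]
    by_cases hk : PySem.Str.lower t ∈ pvKeys
    · simp only [pvKeys, List.mem_cons, List.not_mem_nil, or_false] at hk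
      rcases hk with h|h|h|h|h|h|h|h|h|h|h|h|h|h|h|h|h <;>
        simp only [pvSpecMin, List.exists_mem_cons_iff, h,
          pvg1, pvg2, pvg3, pvg4, pvg5, pvg6, pvg7, pvg8, pvg9, pvg10, pvg11, pvg12, pvg13, pvg14, pvg15, pvg16, pvg17] <;>
        simp only [List.mem_cons, List.not_mem_nil, String.reduceEq, or_false, false_or, or_self,
          true_or, or_true, if_true, if_false, eq_self_iff_true] <;>
        norm_num <;> split_ifs <;> simp [pvMerge] <;> omega
    · rw [pvRank_none _ hk]
      have hG : ∀ G : List String, (∀ g ∈ G, g ∈ pvKeys) →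
          ((∃ x ∈ t :: ts, PySem.Str.lower x ∈ G) ↔ (∃ x ∈ ts, PySem.Str.lower x ∈ G)) := by
        intro G hsub
        rw [List.exists_mem_cons_iff]
        constructor
        · rintro (h | h)
          · exact absurd (hsub _ h) hk
          · exact h
        · exact Or.inr
      have e1 := hG ["c2", "c&c", "command and control", "rat"] (by decide)
      have e2 := hG ["botnet", "ddos"] (by decide)
      have e3 := hG ["scanner", "scanning", "brute force", "bruteforce"] (by decide)
      have e4 := hG ["spam", "phishing"] (by decide)
      have e5 := hG ["ransomware", "malware", "trojan"] (by decide)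
      have e6 := hG ["apt", "targeted attack"] (by decide)
      simp only [pvSpecMin, pvMerge, e1, e2, e3, e4, e5, e6]

-- ===== VERDICT (by name: the statement is the Claim_ definition above) =====
theorem classify_pulse_py_spec : Claim_equal_classify_pulse_py := by
  intro tags _
  show classify_pulse_py tags = classify_pulse_py_alt tags
  rw [pvA_eq, pvB_eq, pvBestOf_eq_specMin]
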